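-- pv_equiv track=rewrite | github.com/elitan/adventofcode | 2017/13/main.py | severityHit
-- ===== SOURCE A (Python) =====
-- def severityHit(pc_offset, firewall, firewall_depth):
--
--     range_index = 0
--     for pc in range(pc_offset, firewall_depth + pc_offset + 1):
--
--         if range_index not in firewall:
--             range_index += 1
--             continue
--
--         fw_layers, fw_mod = firewall[range_index]
--
--         # fw at top position?
--         if pc % fw_mod == 0:
--             return True
--
--         range_index += 1
--
--     return False
-- ===== SOURCE B (Python) =====
-- def severityHit(pc_offset, firewall, firewall_depth):
--     # Instead of stepping through every position of the traversal, look only at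
--     # the layers that actually exist, in ascending depth order: the packet is at
--     # layer `depth` at time pc_offset + depth, and is caught there iff that time
--     # is divisible by the layer's cycle length.
--     for depth, (_layers, mod) in sorted(firewall.items()):
--         if 0 <= depth <= firewall_depth:
--             if (pc_offset + depth) % mod == 0:
--                 return True
--     return False
-- ===== Notes on version B (the rewrite author's own statement) =====
-- stated objective: simpler
-- what changed: B drops A's step-by-step walk over every position in range(pc_offset, firewall_depth+pc_offset+1) with per-position membership tests, and instead scans the firewall's layers once in ascending depth order, returning True at the first layer depth in [0, firewall_depth] with (pc_offset+depth) % mod == 0.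
import Mathlib
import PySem

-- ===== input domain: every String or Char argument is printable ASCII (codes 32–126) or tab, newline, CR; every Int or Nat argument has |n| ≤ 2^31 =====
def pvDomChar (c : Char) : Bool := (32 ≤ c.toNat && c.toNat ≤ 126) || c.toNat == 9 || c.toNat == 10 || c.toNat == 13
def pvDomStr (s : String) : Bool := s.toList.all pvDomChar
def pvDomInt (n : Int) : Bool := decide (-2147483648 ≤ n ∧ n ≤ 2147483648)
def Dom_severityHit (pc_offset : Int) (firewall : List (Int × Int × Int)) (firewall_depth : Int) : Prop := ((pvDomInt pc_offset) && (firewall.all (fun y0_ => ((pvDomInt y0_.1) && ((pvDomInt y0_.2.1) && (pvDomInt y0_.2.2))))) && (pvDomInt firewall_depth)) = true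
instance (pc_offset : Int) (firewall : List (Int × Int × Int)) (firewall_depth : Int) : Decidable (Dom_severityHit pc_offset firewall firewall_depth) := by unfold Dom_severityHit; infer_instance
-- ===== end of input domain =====

-- B replaces A's position-by-position walk with a single pass over the firewall's
-- layers in ascending depth order (caught iff some layer depth in [0, firewall_depth]
-- has (pc_offset + depth) % mod == 0); objective: simpler.

-- ===== PORT A =====
-- the for-loop of A: `pcs` is the remaining range, `ri` the running range_index
def severityHitLoop (firewall : List (Int × Int × Int)) (pcs : List Int) (ri : Int) : Bool :=
  match pcs with
  | [] => false
  | pc :: rest =>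
    match firewall.find? (fun t => t.1 == ri) with   -- `range_index in firewall` + `firewall[range_index]` (first match)
    | none => severityHitLoop firewall rest (ri + 1)
    | some t => if PySem.Int.mod pc t.2.2 = 0 then true else severityHitLoop firewall rest (ri + 1)

def severityHit (pc_offset : Int) (firewall : List (Int × Int × Int)) (firewall_depth : Int) : Bool :=
  severityHitLoop firewall (PySem.List.pyRange pc_offset (firewall_depth + pc_offset + 1) 1) 0

-- ===== PORT B =====
-- Source B's for-loop over the sorted items, with its early return
def severityHitAltLoop (pc_offset firewall_depth : Int) (items : List (Int × Int × Int)) : Bool :=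
  match items with
  | [] => false
  | t :: rest =>
    if 0 ≤ t.1 ∧ t.1 ≤ firewall_depth then
      (if PySem.Int.mod (pc_offset + t.1) t.2.2 = 0 then true
       else severityHitAltLoop pc_offset firewall_depth rest)
    else severityHitAltLoop pc_offset firewall_depth rest

def severityHit_alt (pc_offset : Int) (firewall : List (Int × Int × Int)) (firewall_depth : Int) : Bool :=
  -- sorted(firewall.items()): the depth keys of a Python dict are distinct, so
  -- sorting the items by their first component is exactly Python's tuple sort
  severityHitAltLoop pc_offset firewall_depth (PySem.List.sorted firewall (fun t => t.1) false)

-- ===== PRECONDITION & SPEC =====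
-- Pre_ excludes assoc lists with duplicate depth keys (impossible for a real Python dict)
-- and the inputs on which A raises ZeroDivisionError: those with a zero-cycle layer in
-- range [0, firewall_depth] that is not preceded by a shallower hit layer.
def Pre_severityHit (pc_offset : Int) (firewall : List (Int × Int × Int)) (firewall_depth : Int) : Prop :=
  (firewall.map (·.1)).Nodup ∧
  ∀ t ∈ firewall, 0 ≤ t.1 → t.1 ≤ firewall_depth → t.2.2 = 0 →
    ∃ s ∈ firewall, 0 ≤ s.1 ∧ s.1 < t.1 ∧ s.2.2 ≠ 0 ∧ PySem.Int.mod (pc_offset + s.1) s.2.2 = 0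

instance (pc_offset : Int) (firewall : List (Int × Int × Int)) (firewall_depth : Int) : Decidable (Pre_severityHit pc_offset firewall firewall_depth) := by unfold Pre_severityHit; infer_instance

def pvWitness_severityHit : Int × (List (Int × Int × Int)) × Int := (1, [(0, 3, 4), (4, 2, 2), (6, 5, 8)], 6)

def Spec_severityHit (pc_offset : Int) (firewall : List (Int × Int × Int)) (firewall_depth : Int) (out : Bool) : Prop := out = severityHit_alt pc_offset firewall firewall_depth
instance (pc_offset : Int) (firewall : List (Int × Int × Int)) (firewall_depth : Int) (out : Bool) : Decidable (Spec_severityHit pc_offset firewall firewall_depth out) := by unfold Spec_severityHit; infer_instance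

-- ===== CLAIM (what is proved, stated in full; the proofs are below) =====
def Claim_equal_severityHit : Prop := ∀ (pc_offset : Int) (firewall : List (Int × Int × Int)) (firewall_depth : Int), Dom_severityHit pc_offset firewall firewall_depth → Pre_severityHit pc_offset firewall firewall_depth → Spec_severityHit pc_offset firewall firewall_depth (severityHit pc_offset firewall firewall_depth)

-- ===== LEMMAS AND PROOFS =====

-- the membership/hit test both loops decide, as a predicate on a layer
def hitTest (pc_offset firewall_depth : Int) (t : Int × Int × Int) : Bool :=
  decide (0 ≤ t.1) && decide (t.1 ≤ firewall_depth) &&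
  decide (PySem.Int.mod (pc_offset + t.1) t.2.2 = 0)

-- A's loop over n positions starting at range_index ri equals a filtered scan of the layers
theorem loop_eq (fw : List (Int × Int × Int)) (pc0 : Int) (hnd : (fw.map (·.1)).Nodup) :
    ∀ (n : Nat) (ri : Int),
      severityHitLoop fw (PySem.List.pyRange (pc0 + ri) (pc0 + ri + n) 1) ri
        = fw.any (fun t =>
            decide (ri ≤ t.1) && decide (t.1 < ri + n) &&
            decide (PySem.Int.mod (pc0 + t.1) t.2.2 = 0)) := by
  intro n
  induction n with
  | zero =>
    intro ri
    rw [PySem.List.pyRange_one_eq_nil (by simp)]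
    simp only [severityHitLoop]
    symm
    simp only [List.any_eq_false]
    intro t _
    simp only [Bool.and_eq_true, decide_eq_true_eq, not_and]
    intro h1 h2
    omega
  | succ n ih =>
    intro ri
    rw [PySem.List.pyRange_one_cons (by push_cast; omega)]
    simp only [severityHitLoop]
    have hseg : PySem.List.pyRange (pc0 + ri + 1) (pc0 + ri + ((n : Int) + 1)) 1
        = PySem.List.pyRange (pc0 + (ri + 1)) (pc0 + (ri + 1) + n) 1 := by ring_nf
    have hih := ih (ri + 1)
    cases hfind : fw.find? (fun t => t.1 == ri) with
    | none =>
      have hno : ∀ t ∈ fw, t.1 ≠ ri := by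
        intro t ht
        have := List.find?_eq_none.mp hfind t ht
        simpa using this
      push_cast
      rw [hseg, hih]
      apply PySem.List.any_congr_mem
      intro t ht
      have hne := hno t ht
      have hiff : (decide (ri + 1 ≤ t.1) && decide (t.1 < ri + 1 + (n : Int)))
          = (decide (ri ≤ t.1) && decide (t.1 < ri + ((n : Int) + 1))) := by
        rw [← Bool.decide_and, ← Bool.decide_and, decide_eq_decide]
        omega
      rw [hiff]
    | some t0 =>
      have ht0mem : t0 ∈ fw := List.mem_of_find?_eq_some hfind
      have ht0key : t0.1 = ri := by
        have := List.find?_some hfind; simpa using this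
      by_cases hmod : PySem.Int.mod (pc0 + ri) t0.2.2 = 0
      · simp only [hmod, if_true]
        symm
        rw [List.any_eq_true]
        refine ⟨t0, ht0mem, ?_⟩
        push_cast
        simp [ht0key, hmod]
      · simp only [if_neg hmod]
        push_cast
        rw [hseg, hih]
        rw [Bool.eq_iff_iff]
        simp only [List.any_eq_true, Bool.and_eq_true, decide_eq_true_eq]
        constructor
        · rintro ⟨t, ht, ⟨h1, h2⟩, h3⟩
          exact ⟨t, ht, ⟨by omega, by omega⟩, h3⟩
        · rintro ⟨t, ht, ⟨h1, h2⟩, h3⟩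
          by_cases hk : t.1 = ri
          · exfalso
            have : t = t0 := List.inj_on_of_nodup_map hnd ht ht0mem (by omega)
            rw [this] at h3 hk
            rw [hk] at h3
            exact hmod h3
          · exact ⟨t, ht, ⟨by omega, by omega⟩, h3⟩

-- B's loop with early return is `any` of the hit test
theorem altLoop_eq_any (pc0 fd : Int) :
    ∀ (l : List (Int × Int × Int)),
      severityHitAltLoop pc0 fd l = l.any (hitTest pc0 fd) := by
  intro l
  induction l with
  | nil => simp [severityHitAltLoop]
  | cons t rest ih =>
    simp only [severityHitAltLoop, List.any_cons, hitTest, ih]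
    by_cases h1 : 0 ≤ t.1 ∧ t.1 ≤ fd
    · by_cases h2 : PySem.Int.mod (pc0 + t.1) t.2.2 = 0 <;>
        simp [h1.1, h1.2, h2]
    · rw [if_neg h1]
      rcases Decidable.not_and_iff_not_or_not.mp h1 with h | h <;> simp [h]

-- `any` is invariant under the sorting permutation
theorem any_sorted (fw : List (Int × Int × Int)) (f : Int × Int × Int → Bool) :
    (PySem.List.sorted fw (fun t => t.1) false).any f = fw.any f := by
  rw [Bool.eq_iff_iff]
  simp only [List.any_eq_true]
  constructor
  · rintro ⟨t, ht, hf⟩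
    exact ⟨t, (PySem.List.mem_sorted _ _ _ _).mp ht, hf⟩
  · rintro ⟨t, ht, hf⟩
    exact ⟨t, (PySem.List.mem_sorted _ _ _ _).mpr ht, hf⟩

-- ===== VERDICT (by name: the statement is the Claim_ definition above) =====
theorem severityHit_spec : Claim_equal_severityHit := by
  intro pc0 fw fd _ hpre
  unfold Spec_severityHit severityHit severityHit_alt
  rcases hpre with ⟨hnd, _⟩
  rw [altLoop_eq_any, any_sorted]
  by_cases hfd : fd < 0
  · rw [PySem.List.pyRange_one_eq_nil (by omega)]
    simp only [severityHitLoop]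
    symm
    simp only [List.any_eq_false]
    intro t _
    simp only [hitTest, Bool.and_eq_true, decide_eq_true_eq, not_and]
    intro h1 h2
    omega
  · have key := loop_eq fw pc0 hnd (fd + 1).toNat 0
    rw [show (pc0 + 0 : Int) = pc0 from by ring] at key
    rw [show fd + pc0 + 1 = pc0 + (((fd + 1).toNat : Int)) from by omega, key]
    apply PySem.List.any_congr_mem
    intro t _
    unfold hitTest
    rw [show (decide (t.1 < 0 + ((fd + 1).toNat : Int))) = (decide (t.1 ≤ fd)) from by
      rw [decide_eq_decide]; omega]
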